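-- pv_equiv track=rewrite | github.com/yuboooo/bonifacio | da.py | female_prefered
-- ===== SOURCE A (Python) =====
-- from itertools import permutations
--
-- def female_prefered(male, female, female_pref, female_matches):
--     prefered = False
--     prefered_matches = []
--
--     if female in female_matches:
--         current_matches = female_matches[female]
--         # if m better than m'
--         if current_matches != []:
--             if [male] in female_pref and female_pref.index([male]) < female_pref.index(current_matches):
--                 prefered = True
--                 prefered_matches = [male]
--             potential_matches = []
--             potential_matches.extend(current_matches)
--             potential_matches.extend([male])
--             '''potential_matches = [1, 3] --> perm_matches = [[1, 3], [3, 1]]'''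
--             perm_matches = list(map(list,list(permutations(potential_matches))))
--             for match in perm_matches:
--                 if match in female_pref and female_pref.index(match) < female_pref.index(current_matches):
--                     if prefered == False or female_pref.index(match) < female_pref.index(prefered_matches):
--
--                         prefered = True
--                         prefered_matches = match
--             return (prefered, prefered_matches, current_matches)
--         else:
--             return (False, [], [])
--     else:
--         return (True, [male], [])
-- ===== SOURCE B (Python) =====
-- def female_prefered(male, female, female_pref, female_matches):
--     if female not in female_matches:
--         return (True, [male], [])
--     current_matches = female_matches[female]
--     if not current_matches:
--         return (False, [], [])
--     if current_matches in female_pref: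
--         cap = female_pref.index(current_matches)
--     else:
--         cap = len(female_pref)
--     potential = current_matches + [male]
--     target = sorted(potential)
--     size = len(potential)
--     male_list = [male]
--     for entry in female_pref[:cap]:
--         if entry == male_list or (len(entry) == size and sorted(entry) == target):
--             return (True, entry, current_matches)
--     return (False, [], current_matches)
-- ===== Notes on version B (the rewrite author's own statement) =====
-- stated objective: alternative
-- what changed: Replaces the enumeration of all permutations of current_matches+[male] (each looked up with repeated list.index scans while keeping a running best) by one front-to-back scan of female_pref up to the index of current_matches, returning the first entry that equals [male] or is multiset-equal (same length and sorted form) to current_matches+[male]; intended to avoid the factorial blow-up in len(current_matches), measured only ~1.2x at the largest timing size.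
import Mathlib
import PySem

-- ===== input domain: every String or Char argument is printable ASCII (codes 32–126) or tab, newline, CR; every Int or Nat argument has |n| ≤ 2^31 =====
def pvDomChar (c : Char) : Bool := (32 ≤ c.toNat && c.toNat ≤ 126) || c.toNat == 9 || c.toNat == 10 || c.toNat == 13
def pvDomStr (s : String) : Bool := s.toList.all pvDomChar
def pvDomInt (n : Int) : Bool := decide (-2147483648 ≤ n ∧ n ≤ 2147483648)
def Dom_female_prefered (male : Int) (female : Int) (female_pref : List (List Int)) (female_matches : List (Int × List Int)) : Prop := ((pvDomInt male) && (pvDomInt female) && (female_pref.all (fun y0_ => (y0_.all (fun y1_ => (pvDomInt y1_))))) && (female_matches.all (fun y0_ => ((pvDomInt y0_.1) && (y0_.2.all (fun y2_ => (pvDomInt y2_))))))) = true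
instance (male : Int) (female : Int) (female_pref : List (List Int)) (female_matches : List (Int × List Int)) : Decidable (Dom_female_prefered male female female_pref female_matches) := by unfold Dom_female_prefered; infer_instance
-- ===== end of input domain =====

-- B replaces A's enumeration of all permutations of current_matches+[male] by one front scan of
-- female_pref with a sorted-multiset test; Pre_ excludes exactly the inputs on which A raises ValueError.

-- ===== PORT A =====
-- Python `.index` raises where index? = none; Pre_ excludes every input on which A reaches
-- such a comparison, so the `none` branches of optLtIdx are never taken inside Pre_.


def optLtIdx (a b : Option Nat) : Bool :=
  match a, b with
  | some i, some j => decide (i < j)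
  | _, _ => false

def stepA (female_pref : List (List Int)) (current_matches : List Int)
    (s : Bool × List Int) (m : List Int) : Bool × List Int :=
  if m ∈ female_pref ∧ optLtIdx (PySem.List.index? female_pref m) (PySem.List.index? female_pref current_matches) = true then
    if s.1 = false ∨ optLtIdx (PySem.List.index? female_pref m) (PySem.List.index? female_pref s.2) = true then
      (true, m)
    else s
  else s


def female_prefered (male : Int) (female : Int) (female_pref : List (List Int)) (female_matches : List (Int × List Int)) : Bool × List Int × List Int :=
  match PySem.Dict.get? (PySem.Dict.mk female_matches) female with
  | none => (true, [male], [])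
  | some current_matches =>
    if current_matches = [] then (false, [], [])
    else
      let s0 : Bool × List Int :=
        if [male] ∈ female_pref ∧ optLtIdx (PySem.List.index? female_pref [male]) (PySem.List.index? female_pref current_matches) = true
        then (true, [male]) else (false, [])
      let potential_matches := current_matches ++ [male]
      let perm_matches := PySem.List.permutations potential_matches potential_matches.length
      let s := perm_matches.foldl (stepA female_pref current_matches) s0
      (s.1, s.2, current_matches)

-- ===== PORT B =====
def female_prefered_alt (male : Int) (female : Int) (female_pref : List (List Int)) (female_matches : List (Int × List Int)) : Bool × List Int × List Int :=
  match PySem.Dict.get? (PySem.Dict.mk female_matches) female with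
  | none => (true, [male], [])
  | some current_matches =>
    if current_matches = [] then (false, [], [])
    else
      let cap := (PySem.List.index? female_pref current_matches).getD female_pref.length
      let target := PySem.List.sorted (current_matches ++ [male]) (fun x => x)
      let size := (current_matches ++ [male]).length
      match (female_pref.take cap).find? (fun e => e == [male] || (e.length == size && PySem.List.sorted e (fun x => x) == target)) with
      | some e => (true, e, current_matches)
      | none => (false, [], current_matches)

-- ===== PRECONDITION & SPEC =====
-- Pre_ excludes exactly the inputs on which A raises ValueError: female's nonempty
-- current_matches absent from female_pref while [male] or a permutation of
-- current_matches ++ [male] occurs in female_pref.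
def Pre_female_prefered (male : Int) (female : Int) (female_pref : List (List Int)) (female_matches : List (Int × List Int)) : Prop :=
  let cm := (PySem.Dict.get? (PySem.Dict.mk female_matches) female).getD []
  cm = [] ∨ cm ∈ female_pref ∨
    ([male] ∉ female_pref ∧ ∀ e ∈ female_pref, ¬ e.Perm (cm ++ [male]))
instance (male : Int) (female : Int) (female_pref : List (List Int)) (female_matches : List (Int × List Int)) : Decidable (Pre_female_prefered male female female_pref female_matches) := by unfold Pre_female_prefered; infer_instance

def pvWitness_female_prefered : Int × Int × List (List Int) × (List (Int × List Int)) :=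
  (1, 2, [[1], [3]], [(2, [3])])

def Spec_female_prefered (male : Int) (female : Int) (female_pref : List (List Int)) (female_matches : List (Int × List Int)) (out : Bool × List Int × List Int) : Prop := out = female_prefered_alt male female female_pref female_matches
instance (male : Int) (female : Int) (female_pref : List (List Int)) (female_matches : List (Int × List Int)) (out : Bool × List Int × List Int) : Decidable (Spec_female_prefered male female female_pref female_matches out) := by unfold Spec_female_prefered; infer_instance

-- ===== CLAIM (what is proved, stated in full; the proofs are below) =====
def Claim_equal_female_prefered : Prop := ∀ (male : Int) (female : Int) (female_pref : List (List Int)) (female_matches : List (Int × List Int)), Dom_female_prefered male female female_pref female_matches → Pre_female_prefered male female female_pref female_matches → Spec_female_prefered male female female_pref female_matches (female_prefered male female female_pref female_matches)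

-- ===== LEMMAS AND PROOFS =====


theorem mem_permutations_of_perm (p xs : List Int) (h : p.Perm xs) :
    p ∈ PySem.List.permutations xs xs.length := by
  induction p generalizing xs with
  | nil =>
    have : xs = [] := (List.Perm.nil_eq h).symm
    subst this; simp
  | cons a p ih =>
    have ha : a ∈ xs := h.mem_iff.mp (List.mem_cons_self)
    have hlt : xs.idxOf a < xs.length := List.idxOf_lt_length_of_mem ha
    have hget : xs[xs.idxOf a]? = some a := by
      rw [List.getElem?_eq_getElem hlt]; simp [List.getElem_idxOf]
    have herase : xs.eraseIdx (xs.idxOf a) = xs.erase a :=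
      (List.erase_eq_eraseIdx_of_idxOf rfl).symm
    have hp : p.Perm (xs.erase a) := (h.trans (List.perm_cons_erase ha)).cons_inv
    obtain ⟨m, hm⟩ : ∃ m, xs.length = m + 1 := by
      cases xs with
      | nil => simp at ha
      | cons b t => exact ⟨t.length, rfl⟩
    have hmem := ih (xs.erase a) hp
    have hlenm : (xs.erase a).length = m := by
      rw [List.length_erase_of_mem ha]; omega
    rw [hm, PySem.List.permutations]
    refine List.mem_flatMap.mpr ⟨xs.idxOf a, List.mem_range.mpr hlt, ?_⟩
    rw [hget]
    simp only []
    refine List.mem_map.mpr ⟨p, ?_, rfl⟩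
    rw [herase, ← hlenm]
    exact hmem
theorem stepA_cond_iff (P : List (List Int)) (cm : List Int) (j : Nat)
    (hj : PySem.List.index? P cm = some j) (m : List Int) :
    (m ∈ P ∧ optLtIdx (PySem.List.index? P m) (PySem.List.index? P cm) = true)
      ↔ ∃ i, PySem.List.index? P m = some i ∧ i < j := by
  rw [hj]
  constructor
  · rintro ⟨hmem, hlt⟩
    obtain ⟨i, hi⟩ := Option.isSome_iff_exists.mp ((PySem.List.index?_isSome_iff P m).mpr hmem)
    refine ⟨i, hi, ?_⟩
    rw [hi] at hlt
    simpa [optLtIdx] using hlt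
  · rintro ⟨i, hi, hlt⟩
    have hmem : m ∈ P := (PySem.List.index?_isSome_iff P m).mp (by rw [hi]; rfl)
    refine ⟨hmem, ?_⟩
    rw [hi]; simpa [optLtIdx]

theorem fold_key (P : List (List Int)) (cm : List Int) (j : Nat)
    (hj : PySem.List.index? P cm = some j) :
    ∀ (L : List (List Int)) (s : Bool × List Int),
      (s.1 = false → s.2 = []) →
      (s.1 = true → ∃ i, PySem.List.index? P s.2 = some i ∧ i < j) →
      ((L.foldl (stepA P cm) s).1 = false → (L.foldl (stepA P cm) s).2 = []) ∧
      ((L.foldl (stepA P cm) s).1 = true → ∃ i, PySem.List.index? P (L.foldl (stepA P cm) s).2 = some i ∧ i < j) ∧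
      (L.foldl (stepA P cm) s = s ∨ ∃ m ∈ L, L.foldl (stepA P cm) s = (true, m)) ∧
      (∀ m ∈ L, ∀ i, PySem.List.index? P m = some i → i < j →
         ∃ k, PySem.List.index? P (L.foldl (stepA P cm) s).2 = some k ∧ (L.foldl (stepA P cm) s).1 = true ∧ k ≤ i) ∧
      (s.1 = true → ∃ k, PySem.List.index? P (L.foldl (stepA P cm) s).2 = some k ∧ (L.foldl (stepA P cm) s).1 = true ∧
         ∀ i, PySem.List.index? P s.2 = some i → k ≤ i) := by
  intro L
  induction L with
  | nil =>
    intro s h1 h2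
    refine ⟨h1, h2, Or.inl rfl, by simp, ?_⟩
    intro hs
    obtain ⟨i, hi, hij⟩ := h2 hs
    refine ⟨i, hi, hs, fun i' hi' => ?_⟩
    have := hi.symm.trans hi'
    simp only [Option.some.injEq] at this; omega
  | cons m L ih =>
    intro s h1 h2
    simp only [List.foldl_cons]
    set s' := stepA P cm s m with hs'
    have hcases : (s' = (true, m) ∧ (∃ i, PySem.List.index? P m = some i ∧ i < j) ∧
          (s.1 = false ∨ optLtIdx (PySem.List.index? P m) (PySem.List.index? P s.2) = true)) ∨
        (s' = s ∧ (∀ i, PySem.List.index? P m = some i → i < j →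
           s.1 = true ∧ ∃ ks, PySem.List.index? P s.2 = some ks ∧ ks ≤ i)) := by
      rw [hs']; unfold stepA
      by_cases hc : m ∈ P ∧ optLtIdx (PySem.List.index? P m) (PySem.List.index? P cm) = true
      · have hgood := (stepA_cond_iff P cm j hj m).mp hc
        by_cases hc2 : s.1 = false ∨ optLtIdx (PySem.List.index? P m) (PySem.List.index? P s.2) = true
        · left; exact ⟨by rw [if_pos hc, if_pos hc2], hgood, hc2⟩
        · right
          push_neg at hc2
          obtain ⟨hs1, hs2⟩ := hc2
          refine ⟨by rw [if_pos hc, if_neg (by push_neg; exact ⟨hs1, hs2⟩)], ?_⟩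
          intro i hi _
          have hstrue : s.1 = true := by revert hs1; cases s.1 <;> simp
          obtain ⟨ks, hks, _⟩ := h2 hstrue
          refine ⟨hstrue, ks, hks, ?_⟩
          rw [hi, hks] at hs2
          simp [optLtIdx] at hs2
          omega
      · right
        refine ⟨by rw [if_neg hc], ?_⟩
        intro i hi hij
        exact absurd ((stepA_cond_iff P cm j hj m).mpr ⟨i, hi, hij⟩) hc
    have h1' : s'.1 = false → s'.2 = [] := by
      rcases hcases with ⟨he, _⟩ | ⟨he, _⟩
      · rw [he]; simp
      · rw [he]; exact h1
    have h2' : s'.1 = true → ∃ i, PySem.List.index? P s'.2 = some i ∧ i < j := by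
      rcases hcases with ⟨he, hg, _⟩ | ⟨he, _⟩
      · rw [he]; intro _; exact hg
      · rw [he]; exact h2
    obtain ⟨c1, c2, c3, c4, c5⟩ := ih s' h1' h2'
    refine ⟨c1, c2, ?_, ?_, ?_⟩
    · rcases c3 with hr | ⟨m', hm', hr⟩
      · rcases hcases with ⟨he, _, _⟩ | ⟨he, _⟩
        · exact Or.inr ⟨m, by simp, hr.trans he⟩
        · exact Or.inl (hr.trans he)
      · exact Or.inr ⟨m', by simp [hm'], hr⟩
    · intro m' hm' i hi hij
      rcases List.mem_cons.mp hm' with rfl | hm'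
      · rcases hcases with ⟨he, _, _⟩ | ⟨he, hne⟩
        · have hstrue : s'.1 = true := by rw [he]
          obtain ⟨k, hk, hkt, hmin⟩ := c5 hstrue
          refine ⟨k, hk, hkt, hmin i (by rw [he]; exact hi)⟩
        · obtain ⟨hstrue, ks, hks, hksi⟩ := hne i hi hij
          have hstrue' : s'.1 = true := by rw [he]; exact hstrue
          obtain ⟨k, hk, hkt, hmin⟩ := c5 hstrue'
          have : k ≤ ks := hmin ks (by rw [he]; exact hks)
          exact ⟨k, hk, hkt, by omega⟩
      · exact c4 m' hm' i hi hij
    · intro hstrue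
      obtain ⟨is, his, hisj⟩ := h2 hstrue
      rcases hcases with ⟨he, ⟨im, him, himj⟩, hbeat⟩ | ⟨he, _⟩
      · have himis : im < is := by
          rcases hbeat with hb | hb
          · rw [hstrue] at hb; cases hb
          · rw [him, his] at hb; simpa [optLtIdx] using hb
        have hstrue' : s'.1 = true := by rw [he]
        obtain ⟨k, hk, hkt, hmin⟩ := c5 hstrue'
        have hkim : k ≤ im := hmin im (by rw [he]; exact him)
        refine ⟨k, hk, hkt, fun i' hi' => ?_⟩
        have := his.symm.trans hi'
        simp only [Option.some.injEq] at this
        omega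
      · rw [he] at c5 ⊢
        exact c5 hstrue

theorem optLtIdx_none_right (a : Option Nat) : optLtIdx a none = false := by
  cases a <;> rfl

theorem fold_id (P : List (List Int)) (cm : List Int)
    (h : PySem.List.index? P cm = none) :
    ∀ (L : List (List Int)) (s : Bool × List Int), L.foldl (stepA P cm) s = s := by
  intro L
  induction L with
  | nil => intro s; rfl
  | cons m L ih =>
    intro s
    simp only [List.foldl_cons]
    have hs : stepA P cm s m = s := by
      unfold stepA
      rw [h, optLtIdx_none_right]
      simp
    rw [hs]; exact ih s

theorem q_iff (male : Int) (pot e : List Int) :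
    (e == [male] || (e.length == pot.length && PySem.List.sorted e (fun x => x) == PySem.List.sorted pot (fun x => x))) = true
      ↔ (e = [male] ∨ e.Perm pot) := by
  rw [Bool.or_eq_true, Bool.and_eq_true, beq_iff_eq, beq_iff_eq, beq_iff_eq,
    PySem.List.sorted_id_eq_sorted_id_iff_perm]
  constructor
  · rintro (h | ⟨-, h⟩)
    · exact Or.inl h
    · exact Or.inr h
  · rintro (h | h)
    · exact Or.inl h
    · exact Or.inr ⟨h.length_eq, h⟩

theorem index?_le_of_getElem (P : List (List Int)) (e : List Int) (pos : Nat)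
    (h : pos < P.length) (he : P[pos] = e) :
    ∃ ie, PySem.List.index? P e = some ie ∧ ie ≤ pos := by
  have hmem : e ∈ P := he ▸ List.getElem_mem h
  obtain ⟨ie, hie⟩ := Option.isSome_iff_exists.mp ((PySem.List.index?_isSome_iff P e).mpr hmem)
  refine ⟨ie, hie, ?_⟩
  obtain ⟨hk, hke, hmin⟩ := PySem.List.getElem_of_index?_eq_some hie
  by_contra hlt
  push_neg at hlt
  exact hmin pos hlt he

theorem mem_take_of_index? (P : List (List Int)) (e : List Int) (i j : Nat)
    (h : PySem.List.index? P e = some i) (hij : i < j) : e ∈ P.take j := by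
  obtain ⟨hk, hke, _⟩ := PySem.List.getElem_of_index?_eq_some h
  have hi' : i < (P.take j).length := by
    simp only [List.length_take]; omega
  have hg : (P.take j)[i] = e := by
    rw [List.getElem_take]; exact hke
  exact hg ▸ List.getElem_mem hi'

-- ===== VERDICT (by name: the statement is the Claim_ definition above) =====
theorem female_prefered_spec : Claim_equal_female_prefered := by
  intro male female P fm _ hpre
  unfold Spec_female_prefered
  unfold Pre_female_prefered at hpre
  cases hget : PySem.Dict.get? (PySem.Dict.mk fm) female with
  | none => simp [female_prefered, female_prefered_alt, hget]
  | some cm =>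
    rw [hget] at hpre
    simp only [Option.getD_some] at hpre
    by_cases hnil : cm = []
    · subst hnil; simp [female_prefered, female_prefered_alt, hget]
    · simp only [female_prefered, female_prefered_alt, hget, if_neg hnil]
      by_cases hmemP : cm ∈ P
      · -- current_matches ranked: one front scan up to its index
        obtain ⟨j, hj⟩ := Option.isSome_iff_exists.mp ((PySem.List.index?_isSome_iff P cm).mpr hmemP)
        rw [hj]
        simp only [Option.getD_some]
        set s0 := if [male] ∈ P ∧ optLtIdx (PySem.List.index? P [male]) (some j) = true then ((true, [male]) : Bool × List Int) else (false, []) with hs0def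
        have hs01 : s0.1 = false → s0.2 = [] := by rw [hs0def]; split_ifs <;> simp
        have hs02 : s0.1 = true → ∃ i, PySem.List.index? P s0.2 = some i ∧ i < j := by
          rw [hs0def]; split_ifs with hc
        -- ranked case, s0 facts
          · intro _
            obtain ⟨i, hi, hij⟩ := (stepA_cond_iff P cm j hj [male]).mp (by rw [hj]; exact hc)
            exact ⟨i, hi, hij⟩
          · intro h; cases h
        have hs0true : s0.1 = true → s0.2 = [male] := by rw [hs0def]; split_ifs <;> simp
        have hs0of : ∀ ie, PySem.List.index? P [male] = some ie → ie < j → s0 = (true, [male]) := by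
          intro ie hie hiej
          have h := (stepA_cond_iff P cm j hj [male]).mpr ⟨ie, hie, hiej⟩
          rw [hj] at h
          rw [hs0def, if_pos h]
        set C := PySem.List.permutations (cm ++ [male]) (cm ++ [male]).length with hC
        obtain ⟨c1, c2, c3, c4, c5⟩ := fold_key P cm j hj C s0 hs01 hs02
        set r := List.foldl (stepA P cm) s0 C with hrdef
        have hQr : r.1 = true → (r.2 = [male] ∨ r.2.Perm (cm ++ [male])) := by
          intro hrt
          rcases c3 with he | ⟨m, hm, he⟩
          · left
            rw [he] at hrt ⊢
            exact hs0true hrt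
          · right
            rw [he]
            exact PySem.List.perm_of_mem_permutations hm
        cases hfind : (P.take j).find? (fun e => e == [male] || (e.length == (cm ++ [male]).length && PySem.List.sorted e (fun x => x) == PySem.List.sorted (cm ++ [male]) (fun x => x))) with
        | none =>
          have hforall := List.find?_eq_none.mp hfind
          show (r.1, r.2, cm) = (false, [], cm)
          cases hr1 : r.1 with
          | false => rw [c1 hr1]
          | true =>
            exfalso
            obtain ⟨i, hi, hij⟩ := c2 hr1
            have hmemtake := mem_take_of_index? P r.2 i j hi hij
            have hq : (r.2 == [male] || (r.2.length == (cm ++ [male]).length && PySem.List.sorted r.2 (fun x => x) == PySem.List.sorted (cm ++ [male]) (fun x => x))) = true :=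
              (q_iff male (cm ++ [male]) r.2).mpr (hQr hr1)
            exact hforall r.2 hmemtake hq
        | some e =>
          obtain ⟨hqe, as, bs, htake, hmin⟩ := List.find?_eq_some_iff_append.mp hfind
          have hposlen : as.length < (P.take j).length := by rw [htake]; simp
          have hlentake : (P.take j).length = min j P.length := by simp [List.length_take]
          have hposP : as.length < P.length := by omega
          have hposj : as.length < j := by omega
          have hgetTake : (P.take j)[as.length]'hposlen = e := by
            simp only [htake]
            rw [List.getElem_append_right (le_refl as.length)]
            simp
          have hgetP : P[as.length]'hposP = e := by
            rw [← List.getElem_take]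
            exact hgetTake
          obtain ⟨ie, hie, hiepos⟩ := index?_le_of_getElem P e as.length hposP hgetP
          have hiej : ie < j := lt_of_le_of_lt hiepos hposj
          have hkfacts : ∃ k, PySem.List.index? P r.2 = some k ∧ r.1 = true ∧ k ≤ ie := by
            rcases (q_iff male (cm ++ [male]) e).mp hqe with rfl | hperm
            · have hs0e := hs0of ie hie hiej
              have hs0t : s0.1 = true := by rw [hs0e]
              obtain ⟨k, hk, hkt, hmink⟩ := c5 hs0t
              exact ⟨k, hk, hkt, hmink ie (by rw [hs0e]; exact hie)⟩
            · have hmemC : e ∈ C := mem_permutations_of_perm e (cm ++ [male]) hperm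
              exact c4 e hmemC ie hie hiej
          obtain ⟨k, hk, hkt, hkie⟩ := hkfacts
          obtain ⟨ik, hik, hikj⟩ := c2 hkt
          have hkk : ik = k := by
            have := hik.symm.trans hk
            simpa using this
          have hkj : k < j := by omega
          obtain ⟨hklen, hPk, _⟩ := PySem.List.getElem_of_index?_eq_some hk
          have hqr2 : (r.2 == [male] || (r.2.length == (cm ++ [male]).length && PySem.List.sorted r.2 (fun x => x) == PySem.List.sorted (cm ++ [male]) (fun x => x))) = true :=
            (q_iff male (cm ++ [male]) r.2).mpr (hQr hkt)
          have hge : ¬ k < as.length := by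
            intro hlt
            have hklt : k < (P.take j).length := by omega
            have hktake : (P.take j)[k]'hklt = r.2 := by
              rw [List.getElem_take]
              exact hPk
            have hmemas : r.2 ∈ as := by
              have hh : (P.take j)[k]'hklt = as[k]'hlt := by
                simp only [htake]
                exact List.getElem_append_left hlt
              rw [hh] at hktake
              rw [← hktake]
              exact List.getElem_mem hlt
            have := hmin r.2 hmemas
            rw [hqr2] at this
            cases this
          have hkeq : k = as.length := by omega
          have hr2e : r.2 = e := by
            rw [← hPk, ← hgetP]
            congr 1
          show (r.1, r.2, cm) = (true, e, cm)
          rw [hkt, hr2e]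
      · -- current_matches unranked: Pre_ forces no qualifying entry anywhere
        have hjn : PySem.List.index? P cm = none := (PySem.List.index?_eq_none_iff P cm).mpr hmemP
        rcases hpre with h | h | ⟨hnm, hnp⟩
        · exact absurd h hnil
        · exact absurd h hmemP
        · rw [fold_id P cm hjn, hjn]
          simp only [Option.getD_none]
          have hfind : (P.take P.length).find? (fun e => e == [male] || (e.length == (cm ++ [male]).length && PySem.List.sorted e (fun x => x) == PySem.List.sorted (cm ++ [male]) (fun x => x))) = none := by
            rw [List.find?_eq_none]
            intro e he hq
            rcases (q_iff male (cm ++ [male]) e).mp hq with rfl | hperm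
            · exact hnm (by simpa using he)
            · exact hnp e (by simpa using he) hperm
          rw [hfind]
          have hs0 : (if [male] ∈ P ∧ optLtIdx (PySem.List.index? P [male]) none = true
              then ((true, [male]) : Bool × List Int) else (false, [])) = (false, []) := by
            rw [if_neg]
            rintro ⟨_, hlt⟩
            rw [optLtIdx_none_right] at hlt
            cases hlt
          rw [hs0]
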